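-- pv_equiv track=rewrite | github.com/DROOdotFOO/agent-skills | agents/autoresearch/src/autoresearch/agent.py | parse_agent_response
-- ===== SOURCE A (Python) =====
-- def parse_agent_response(text: str) -> tuple[str, dict[str, str]]:
--     """Parse the agent's response into description and file changes.
--
--     Expected format:
--     DESCRIPTION: <description>
--     FILE: <filename>
--     ```
--     <content>
--     ```
--     """
--     description = ""
--     files: dict[str, str] = {}
--
--     lines = text.split("\n")
--     i = 0
--     while i < len(lines):
--         line = lines[i]
--
--         if line.startswith("DESCRIPTION:"):
--             description = line[len("DESCRIPTION:") :].strip()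
--
--         elif line.startswith("FILE:"):
--             filename = line[len("FILE:") :].strip()
--             # Find the code block
--             i += 1
--             while i < len(lines) and not lines[i].startswith("```"):
--                 i += 1
--             i += 1  # Skip opening ```
--             content_lines = []
--             while i < len(lines) and not lines[i].startswith("```"):
--                 content_lines.append(lines[i])
--                 i += 1
--             files[filename] = "\n".join(content_lines)
--
--         i += 1
--
--     if not description:
--         description = "Agent-proposed change"
--
--     return description, files
-- ===== SOURCE B (Python) =====
-- def parse_agent_response(text: str) -> tuple[str, dict[str, str]]:
--     """Single-pass state machine: NORMAL / SEEKING_FENCE / IN_CONTENT."""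
--     NORMAL, SEEKING, CONTENT = 0, 1, 2
--     description = ""
--     files: dict[str, str] = {}
--     state = NORMAL
--     filename = ""
--     acc: list[str] = []
--     for line in text.split("\n"):
--         if state == NORMAL:
--             if line.startswith("DESCRIPTION:"):
--                 description = line[len("DESCRIPTION:"):].strip()
--             elif line.startswith("FILE:"):
--                 filename = line[len("FILE:"):].strip()
--                 files[filename] = ""
--                 state = SEEKING
--         elif state == SEEKING:
--             if line.startswith("```"):
--                 acc = []
--                 state = CONTENT
--         else:  # CONTENT
--             if line.startswith("```"):
--                 files[filename] = "\n".join(acc)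
--                 state = NORMAL
--             else:
--                 acc.append(line)
--     if state == CONTENT:
--         files[filename] = "\n".join(acc)
--     if not description:
--         description = "Agent-proposed change"
--     return description, files
-- ===== Notes on version B (the rewrite author's own statement) =====
-- stated objective: simpler
-- what changed: Replaced A's manual index with nested inner while-loops by a single for-loop state machine (NORMAL/SEEKING_FENCE/IN_CONTENT) that registers each file on sight and flushes content at the closing fence or EOF.
import Mathlib
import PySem

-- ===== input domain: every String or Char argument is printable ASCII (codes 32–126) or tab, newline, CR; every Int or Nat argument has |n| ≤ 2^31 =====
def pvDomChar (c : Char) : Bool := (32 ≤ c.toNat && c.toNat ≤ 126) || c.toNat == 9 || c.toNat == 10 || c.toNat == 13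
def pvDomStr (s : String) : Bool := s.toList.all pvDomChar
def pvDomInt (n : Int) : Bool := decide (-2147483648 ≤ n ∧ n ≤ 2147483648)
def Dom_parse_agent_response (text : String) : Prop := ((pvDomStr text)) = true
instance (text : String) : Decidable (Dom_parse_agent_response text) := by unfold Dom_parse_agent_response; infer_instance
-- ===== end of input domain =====

-- B replaces A's manual index with nested inner while-loops by a one-pass state machine; same cost, plainer control flow.

-- ===== PORT A =====
-- the guard of A's inner while loops: this line does NOT start a code fence
def pvNotFence (l : String) : Bool := !(PySem.Str.startswith l "```")

-- A's outer `while i < len(lines)` loop; the two inner while loops over the index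
-- become takeWhile/dropWhile over the remaining lines (i only moves forward).
def parseA_go (lines : List String) (description : String)
    (files : PySem.Dict String String) : String × (List (String × String)) :=
  match lines with
  | [] =>
      ((if description = "" then "Agent-proposed change" else description), files.items)
  | line :: rest =>
      if PySem.Str.startswith line "DESCRIPTION:" then
        parseA_go rest (PySem.Str.strip (PySem.Str.slice line (some 12) none)) files
      else if PySem.Str.startswith line "FILE:" then
        let filename := PySem.Str.strip (PySem.Str.slice line (some 5) none)
        -- while i < len(lines) and not lines[i].startswith("```"): i += 1
        let after := rest.dropWhile pvNotFence
        -- i += 1  (skip opening ```)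
        let rest2 := after.drop 1
        -- while i < len(lines) and not lines[i].startswith("```"): collect
        let content := rest2.takeWhile pvNotFence
        let rest3 := rest2.drop content.length
        -- files[filename] = "\n".join(content_lines); i += 1
        parseA_go (rest3.drop 1) description
          (files.insert filename (PySem.Str.join "\n" content))
      else
        parseA_go rest description files
termination_by lines.length
decreasing_by
  · simp
  · have h1 : (rest.dropWhile pvNotFence).length ≤ rest.length :=
      List.length_dropWhile_le pvNotFence rest
    simp only [List.length_drop, List.length_cons]
    omega
  · simp

def parse_agent_response (text : String) : String × (List (String × String)) :=
  match PySem.Str.split? text "\n" with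
  | some lines => parseA_go lines "" PySem.Dict.empty
  | none => ("", [])   -- unreachable: the separator "\n" is nonempty

-- ===== PORT B =====
-- the parser state of Source B: NORMAL / SEEKING_FENCE (after FILE:) / IN_CONTENT
inductive PBMode : Type
  | normal : PBMode
  | seeking : String → PBMode
  | content : String → List String → PBMode
deriving DecidableEq, Repr

-- one iteration of Source B's `for line in lines` loop
def parseB_step (st : String × PySem.Dict String String × PBMode) (line : String) :
    String × PySem.Dict String String × PBMode :=
  match st with
  | (desc, files, PBMode.normal) =>
      if PySem.Str.startswith line "DESCRIPTION:" then
        (PySem.Str.strip (PySem.Str.slice line (some 12) none), files, PBMode.normal)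
      else if PySem.Str.startswith line "FILE:" then
        let fn := PySem.Str.strip (PySem.Str.slice line (some 5) none)
        (desc, files.insert fn "", PBMode.seeking fn)
      else (desc, files, PBMode.normal)
  | (desc, files, PBMode.seeking fn) =>
      if PySem.Str.startswith line "```" then (desc, files, PBMode.content fn [])
      else (desc, files, PBMode.seeking fn)
  | (desc, files, PBMode.content fn acc) =>
      if PySem.Str.startswith line "```" then
        (desc, files.insert fn (PySem.Str.join "\n" acc), PBMode.normal)
      else (desc, files, PBMode.content fn (acc ++ [line]))

-- Source B's code after the loop: flush an unclosed content block, default the description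
def parseB_finish (st : String × PySem.Dict String String × PBMode) :
    String × (List (String × String)) :=
  match st with
  | (desc, files, st') =>
      let files' :=
        match st' with
        | PBMode.content fn acc => files.insert fn (PySem.Str.join "\n" acc)
        | _ => files
      ((if desc = "" then "Agent-proposed change" else desc), files'.items)

def parse_agent_response_alt (text : String) : String × (List (String × String)) :=
  match PySem.Str.split? text "\n" with
  | some lines => parseB_finish (lines.foldl parseB_step ("", PySem.Dict.empty, PBMode.normal))
  | none => ("", [])   -- unreachable: the separator "\n" is nonempty

-- ===== PRECONDITION & SPEC =====
def Spec_parse_agent_response (text : String) (out : String × (List (String × String))) : Prop := out = parse_agent_response_alt text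
instance (text : String) (out : String × (List (String × String))) : Decidable (Spec_parse_agent_response text out) := by unfold Spec_parse_agent_response; infer_instance

-- ===== CLAIM (what is proved, stated in full; the proofs are below) =====
def Claim_equal_parse_agent_response : Prop := ∀ (text : String), Dom_parse_agent_response text → Spec_parse_agent_response text (parse_agent_response text)

-- ===== LEMMAS AND PROOFS =====

-- B's SEEKING_FENCE state scans to the first fence line, then enters IN_CONTENT
lemma foldl_seeking (ls : List String) (d : String) (f : PySem.Dict String String)
    (fn : String) :
    ls.foldl parseB_step (d, f, PBMode.seeking fn) =
      match ls.dropWhile pvNotFence with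
      | [] => (d, f, PBMode.seeking fn)
      | _ :: t => t.foldl parseB_step (d, f, PBMode.content fn []) := by
  induction ls with
  | nil => simp
  | cons x xs ih =>
      by_cases hx : PySem.Chars.startswith x.toList ['`', '`', '`'] = true
      · simp [List.foldl_cons, parseB_step, pvNotFence, hx]
      · rw [Bool.not_eq_true] at hx
        simp [List.foldl_cons, parseB_step, pvNotFence, hx, ih]

-- B's IN_CONTENT state accumulates lines up to the next fence (or end of input)
lemma foldl_content (ls : List String) (d : String) (f : PySem.Dict String String)
    (fn : String) (acc : List String) :
    ls.foldl parseB_step (d, f, PBMode.content fn acc) =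
      match ls.dropWhile pvNotFence with
      | [] => (d, f, PBMode.content fn (acc ++ ls.takeWhile pvNotFence))
      | _ :: t =>
          t.foldl parseB_step
            (d, f.insert fn (PySem.Str.join "\n" (acc ++ ls.takeWhile pvNotFence)),
             PBMode.normal) := by
  induction ls generalizing acc with
  | nil => simp
  | cons x xs ih =>
      by_cases hx : PySem.Chars.startswith x.toList ['`', '`', '`'] = true
      · simp [List.foldl_cons, parseB_step, pvNotFence, hx]
      · rw [Bool.not_eq_true] at hx
        rw [List.foldl_cons]
        have hstep : parseB_step (d, f, PBMode.content fn acc) x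
            = (d, f, PBMode.content fn (acc ++ [x])) := by
          simp [parseB_step, hx]
        rw [hstep, ih (acc ++ [x])]
        simp [pvNotFence, hx]

-- dropping the consumed content prefix is exactly dropWhile
lemma drop_takeWhile_length (l : List String) (p : String → Bool) :
    l.drop (l.takeWhile p).length = l.dropWhile p := by
  have h := List.takeWhile_append_dropWhile (p := p) (l := l)
  calc l.drop (l.takeWhile p).length
      = ((l.takeWhile p) ++ l.dropWhile p).drop (l.takeWhile p).length := by rw [h]
    _ = l.dropWhile p := List.drop_left

lemma join_nil_str : PySem.Str.join "\n" ([] : List String) = "" := by decide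

-- main invariant: A's index loop equals B's fold from the NORMAL state
lemma goA_eq_foldB : ∀ (lines : List String) (desc : String)
    (files : PySem.Dict String String),
    parseA_go lines desc files =
      parseB_finish (lines.foldl parseB_step (desc, files, PBMode.normal))
  | [], desc, files => by simp [parseA_go, parseB_finish]
  | line :: rest, desc, files => by
      by_cases hd : PySem.Chars.startswith line.toList ['D','E','S','C','R','I','P','T','I','O','N',':'] = true
      · have ih := goA_eq_foldB rest
          (PySem.Str.strip (PySem.Str.slice line (some 12) none)) files
        simp only [parseA_go, List.foldl_cons]
        simp [parseB_step, hd, ih]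
      · rw [Bool.not_eq_true] at hd
        by_cases hf : PySem.Chars.startswith line.toList ['F','I','L','E',':'] = true
        · -- FILE: branch
          simp only [parseA_go, List.foldl_cons]
          have hstep : parseB_step (desc, files, PBMode.normal) line
              = (desc,
                 files.insert (PySem.Str.strip (PySem.Str.slice line (some 5) none)) "",
                 PBMode.seeking (PySem.Str.strip (PySem.Str.slice line (some 5) none))) := by
            simp [parseB_step, hd, hf]
          rw [hstep, foldl_seeking]
          cases hdw : rest.dropWhile pvNotFence with
          | nil =>
              simp [hd, hf, parseA_go, parseB_finish, join_nil_str]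
          | cons x t =>
              dsimp only
              rw [foldl_content]
              cases hdw2 : t.dropWhile pvNotFence with
              | nil =>
                  simp [hd, hf, hdw2, drop_takeWhile_length, parseA_go,
                    parseB_finish, PySem.Dict.insert_insert_self]
              | cons y t2 =>
                  have ih := goA_eq_foldB t2 desc
                    (files.insert (PySem.Str.strip (PySem.Str.slice line (some 5) none))
                      (PySem.Str.join "\n" (t.takeWhile pvNotFence)))
                  simp [hd, hf, hdw2, drop_takeWhile_length,
                    PySem.Dict.insert_insert_self, ih]
        · rw [Bool.not_eq_true] at hf
          have ih := goA_eq_foldB rest desc files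
          simp only [parseA_go, List.foldl_cons]
          simp [parseB_step, hd, hf, ih]
termination_by lines => lines.length
decreasing_by
  · simp
  · have h1 := List.length_dropWhile_le pvNotFence rest
    rw [hdw] at h1
    have h2 := List.length_dropWhile_le pvNotFence t
    rw [hdw2] at h2
    simp only [List.length_cons] at h1 h2 ⊢
    omega
  · simp

-- ===== VERDICT (by name: the statement is the Claim_ definition above) =====
theorem parse_agent_response_spec : Claim_equal_parse_agent_response := by
  intro text _
  unfold Spec_parse_agent_response parse_agent_response parse_agent_response_alt
  cases h : PySem.Str.split? text "\n" with
  | none => rfl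
  | some lines => exact goA_eq_foldB lines "" PySem.Dict.empty
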